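-- pv_equiv track=rewrite | github.com/anaOmargrit/usando_python | traducir_a_geringoso.py | diccionario_geringoso
-- ===== SOURCE A (Python) =====
-- def diccionario_geringoso(lista):
--     nueva_lista = []
--
--     for palabra in lista:
--         npalabra = ''
--         for c in palabra:
--             npalabra += c
--
--             if c in 'aeiou':
--                 npalabra += 'p' + c
--
--             elif c in 'AEIOU':
--                 npalabra += 'P' + c
--
--         nueva_lista.append(npalabra)
--     d = dict(zip(lista, nueva_lista))
--
--     return d
-- ===== SOURCE B (Python) =====
-- def diccionario_geringoso(lista):
--     tabla = {ord(v): v + 'p' + v for v in 'aeiou'}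
--     tabla.update({ord(v): v + 'P' + v for v in 'AEIOU'})
--     return {palabra: palabra.translate(tabla) for palabra in lista}
-- ===== Notes on version B (the rewrite author's own statement) =====
-- stated objective: idiomatic
-- what changed: Replaces the explicit nested character loop with if/elif branching by a translation table built once and applied per word via str.translate, and builds the result with a dict comprehension instead of append/zip/dict.
import Mathlib
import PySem

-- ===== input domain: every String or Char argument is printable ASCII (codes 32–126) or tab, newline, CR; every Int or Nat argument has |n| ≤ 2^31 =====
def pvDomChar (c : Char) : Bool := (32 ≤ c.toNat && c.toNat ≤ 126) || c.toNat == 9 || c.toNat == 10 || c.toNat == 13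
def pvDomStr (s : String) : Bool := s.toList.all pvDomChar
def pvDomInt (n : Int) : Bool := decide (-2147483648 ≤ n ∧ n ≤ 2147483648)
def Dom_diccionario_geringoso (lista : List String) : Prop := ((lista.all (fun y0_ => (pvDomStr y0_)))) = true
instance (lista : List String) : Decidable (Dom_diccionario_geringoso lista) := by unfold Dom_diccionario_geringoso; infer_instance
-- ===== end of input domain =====

-- B replaces A's nested character loop with if/elif by a translation table applied per word
-- (str.translate) and a dict comprehension instead of append/zip/dict; same cost, more idiomatic.

-- ===== PORT A =====
-- inner loop: npalabra += c; if c in 'aeiou': npalabra += 'p'+c elif c in 'AEIOU': npalabra += 'P'+c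
def pvGerA (palabra : String) : String :=
  String.ofList (palabra.toList.foldl (fun np c =>
    let np := np ++ [c]
    if "aeiou".toList.contains c then np ++ ['p'] ++ [c]
    else if "AEIOU".toList.contains c then np ++ ['P'] ++ [c]
    else np) [])

def diccionario_geringoso (lista : List String) : List (String × String) :=
  let nueva_lista := lista.foldl (fun acc palabra => acc ++ [pvGerA palabra]) []
  (PySem.Dict.ofList (lista.zip nueva_lista)).items

-- ===== PORT B =====
-- the translation table: each vowel v ↦ v + 'p'/'P' + v (keys are the chars; exact for str.translate)
def pvTabla : PySem.Dict Char (List Char) :=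
  PySem.Dict.update
    (PySem.Dict.ofList ("aeiou".toList.map (fun v => (v, [v, 'p', v]))))
    ("AEIOU".toList.map (fun v => (v, [v, 'P', v])))

-- palabra.translate(tabla): chars found in the table are replaced by the mapped string
def pvTranslate (palabra : String) : String :=
  String.ofList (palabra.toList.flatMap (fun c =>
    match pvTabla.get? c with
    | some r => r
    | none => [c]))

def diccionario_geringoso_alt (lista : List String) : List (String × String) :=
  (lista.foldl (fun d palabra => d.insert palabra (pvTranslate palabra)) PySem.Dict.empty).items

-- ===== PRECONDITION & SPEC =====
def Spec_diccionario_geringoso (lista : List String) (out : List (String × String)) : Prop := out = diccionario_geringoso_alt lista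
instance (lista : List String) (out : List (String × String)) : Decidable (Spec_diccionario_geringoso lista out) := by unfold Spec_diccionario_geringoso; infer_instance

-- ===== CLAIM (what is proved, stated in full; the proofs are below) =====
def Claim_equal_diccionario_geringoso : Prop := ∀ (lista : List String), Dom_diccionario_geringoso lista → Spec_diccionario_geringoso lista (diccionario_geringoso lista)

-- ===== LEMMAS AND PROOFS =====

-- the per-character step of A equals the table lookup of B
theorem pvStep_eq (c : Char) :
    (c :: (if "aeiou".toList.contains c then ['p', c]
           else if "AEIOU".toList.contains c then ['P', c] else [])) =
    (match pvTabla.get? c with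
     | some r => r
     | none => [c]) := by
  by_cases ha : c = 'a'
  · subst ha; decide
  by_cases he : c = 'e'
  · subst he; decide
  by_cases hi : c = 'i'
  · subst hi; decide
  by_cases ho : c = 'o'
  · subst ho; decide
  by_cases hu : c = 'u'
  · subst hu; decide
  by_cases hA : c = 'A'
  · subst hA; decide
  by_cases hE : c = 'E'
  · subst hE; decide
  by_cases hI : c = 'I'
  · subst hI; decide
  by_cases hO : c = 'O'
  · subst hO; decide
  by_cases hU : c = 'U'
  · subst hU; decide
  have htab : pvTabla = PySem.Dict.mk
      [('a', ['a','p','a']), ('e', ['e','p','e']), ('i', ['i','p','i']),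
       ('o', ['o','p','o']), ('u', ['u','p','u']),
       ('A', ['A','P','A']), ('E', ['E','P','E']), ('I', ['I','P','I']),
       ('O', ['O','P','O']), ('U', ['U','P','U'])] := by decide
  have h1 : "aeiou".toList = ['a','e','i','o','u'] := by decide
  have h2 : "AEIOU".toList = ['A','E','I','O','U'] := by decide
  rw [htab]
  simp [PySem.Dict.get?, h1, h2, List.contains_eq_mem,
    ha, he, hi, ho, hu, hA, hE, hI, hO, hU,
    Ne.symm ha, Ne.symm he, Ne.symm hi, Ne.symm ho, Ne.symm hu,
    Ne.symm hA, Ne.symm hE, Ne.symm hI, Ne.symm hO, Ne.symm hU]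

theorem pvGerA_eq_translate (p : String) : pvGerA p = pvTranslate p := by
  unfold pvGerA pvTranslate
  congr 1
  have : ∀ (np : List Char),
      p.toList.foldl (fun np c =>
        let np := np ++ [c]
        if "aeiou".toList.contains c then np ++ ['p'] ++ [c]
        else if "AEIOU".toList.contains c then np ++ ['P'] ++ [c]
        else np) np
      = np ++ p.toList.flatMap (fun c =>
          match pvTabla.get? c with
          | some r => r
          | none => [c]) := by
    intro np
    rw [← PySem.List.foldl_append_eq_flatMap]
    apply PySem.List.foldl_congr_mem
    intro acc c _
    rw [← pvStep_eq c]
    simp only []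
    split_ifs <;> simp
  simpa using this []

theorem diccionario_geringoso_spec : Claim_equal_diccionario_geringoso := by
  intro lista _
  unfold Spec_diccionario_geringoso diccionario_geringoso diccionario_geringoso_alt
  simp only [PySem.List.foldl_append_singleton_eq_map, List.nil_append]
  congr 1
  have hz : lista.zip (lista.map pvGerA) = lista.map (fun p => (p, pvTranslate p)) := by
    rw [show lista.zip (lista.map pvGerA) = (lista.map id).zip (lista.map pvGerA) by simp,
        List.zip_map']
    simp [pvGerA_eq_translate]
  rw [hz]
  show (lista.map fun p => (p, pvTranslate p)).foldl
      (fun d pr => d.insert pr.1 pr.2) PySem.Dict.empty = _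
  rw [List.foldl_map]
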